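-- pv_equiv track=rewrite | github.com/rschaeff/dpam_c2 | dpam/utils/ranges.py | filter_segments_by_length
-- ===== SOURCE A (Python) =====
-- from typing import List, Set
--
-- def filter_segments_by_length(
--     residues: List[int],
--     min_segment_length: int = 5,
--     max_gap: int = 10
-- ) -> List[int]:
--     """
--     Filter residues by grouping into segments and keeping only long ones.
--
--     Args:
--         residues: List of residue IDs
--         min_segment_length: Minimum segment length to keep
--         max_gap: Maximum gap to consider residues in same segment
--
--     Returns:
--         Filtered list of residues in segments >= min_segment_length
--     """
--     if not residues:
--         return []
--
--     residues = sorted(residues)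
--     segments = []
--     current_seg = [residues[0]]
--
--     for resid in residues[1:]:
--         if resid > current_seg[-1] + max_gap:
--             segments.append(current_seg)
--             current_seg = [resid]
--         else:
--             current_seg.append(resid)
--
--     segments.append(current_seg)
--
--     # Keep only long segments
--     filtered = []
--     for seg in segments:
--         if len(seg) >= min_segment_length:
--             filtered.extend(seg)
--
--     return filtered
-- ===== SOURCE B (Python) =====
-- def filter_segments_by_length(residues, min_segment_length=5, max_gap=10):
--     r = sorted(residues)
--     # label each residue with the id of its gap-bounded run
--     labels = []
--     run = 0
--     prev = None
--     for x in r: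
--         if prev is not None and x > prev + max_gap:
--             run += 1
--         labels.append(run)
--         prev = x
--     # tally run sizes in a hash map
--     counts = {}
--     for lab in labels:
--         counts[lab] = counts.get(lab, 0) + 1
--     # keep residues belonging to a sufficiently large run
--     return [x for x, lab in zip(r, labels) if counts.get(lab, 0) >= min_segment_length]
-- ===== Notes on version B (the rewrite author's own statement) =====
-- stated objective: alternative
-- what changed: Instead of accumulating explicit segment lists and filtering them, B labels every sorted residue with a run id in one pass, tallies run sizes in a hash map, and keeps each residue by looking up its run's count - no segment lists or slices are ever built.
import Mathlib
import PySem

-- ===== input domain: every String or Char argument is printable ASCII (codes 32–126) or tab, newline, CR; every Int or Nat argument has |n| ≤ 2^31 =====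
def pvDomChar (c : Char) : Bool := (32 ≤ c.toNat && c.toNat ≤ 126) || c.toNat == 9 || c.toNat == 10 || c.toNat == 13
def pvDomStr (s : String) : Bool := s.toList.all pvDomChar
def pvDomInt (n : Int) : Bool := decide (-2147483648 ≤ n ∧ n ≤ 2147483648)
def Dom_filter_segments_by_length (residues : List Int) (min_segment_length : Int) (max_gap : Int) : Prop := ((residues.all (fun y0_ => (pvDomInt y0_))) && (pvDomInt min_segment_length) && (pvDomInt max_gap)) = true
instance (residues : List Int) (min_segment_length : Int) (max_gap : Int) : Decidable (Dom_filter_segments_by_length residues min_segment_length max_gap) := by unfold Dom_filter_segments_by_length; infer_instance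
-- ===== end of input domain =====

-- B replaces A's segment-list accumulation and second filtering loop with a label/count/filter
-- scheme: one pass labels each sorted residue with its run id, a hash map tallies run sizes, and
-- a final lookup keeps residues of large runs (objective: alternative; same asymptotic cost).


-- ===== PORT A =====
-- literal port of A: sort, fold residues[1:] accumulating (segments, current_seg), close the
-- last segment, then a second loop keeping only segments of length ≥ min_segment_length
def filter_segments_by_length (residues : List Int) (min_segment_length : Int) (max_gap : Int) : List Int :=
  if residues = [] then []
  else
    let r := PySem.List.sorted residues (fun x => x) false
    let st := (PySem.List.slice r (some 1) none).foldl
      (fun (st : List (List Int) × List Int) resid =>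
        if PySem.List.pyGetD st.2 (-1) 0 + max_gap < resid then
          (st.1 ++ [st.2], [resid])
        else
          (st.1, st.2 ++ [resid]))
      ([], [PySem.List.pyGetD r 0 0])
    let segments := st.1 ++ [st.2]
    segments.foldl (fun filtered seg =>
      if min_segment_length ≤ (seg.length : Int) then filtered ++ seg else filtered) []

-- ===== PORT B =====
-- the body of B's labelling loop: if prev is set and x opens a gap, start a new run id;
-- then append the current run id to labels and remember x as prev
def pvStepB (g : Int) (st : List Int × Int × Option Int) (x : Int) : List Int × Int × Option Int :=
  let run := match st.2.2 with
    | some p => if p + g < x then st.2.1 + 1 else st.2.1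
    | none => st.2.1
  (st.1 ++ [run], run, some x)

-- literal port of B: sort; label every residue with its run id; tally run sizes in a dict
-- (counts[lab] = counts.get(lab, 0) + 1); keep residues whose run's count is large enough
def filter_segments_by_length_alt (residues : List Int) (min_segment_length : Int) (max_gap : Int) : List Int :=
  let r := PySem.List.sorted residues (fun x => x) false
  let st := r.foldl (pvStepB max_gap) ([], 0, none)
  let labels := st.1
  let counts := labels.foldl (fun d lab => d.insert lab (d.getD lab 0 + 1)) PySem.Dict.empty
  ((r.zip labels).filter (fun p => decide (min_segment_length ≤ counts.getD p.2 0))).map Prod.fst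

-- ===== PRECONDITION & SPEC =====
def Spec_filter_segments_by_length (residues : List Int) (min_segment_length : Int) (max_gap : Int) (out : List Int) : Prop := out = filter_segments_by_length_alt residues min_segment_length max_gap
instance (residues : List Int) (min_segment_length : Int) (max_gap : Int) (out : List Int) : Decidable (Spec_filter_segments_by_length residues min_segment_length max_gap out) := by unfold Spec_filter_segments_by_length; infer_instance

-- ===== CLAIM (what is proved, stated in full; the proofs are below) =====
def Claim_equal_filter_segments_by_length : Prop := ∀ (residues : List Int) (min_segment_length : Int) (max_gap : Int), Dom_filter_segments_by_length residues min_segment_length max_gap → Spec_filter_segments_by_length residues min_segment_length max_gap (filter_segments_by_length residues min_segment_length max_gap)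

-- ===== LEMMAS AND PROOFS =====

-- the gap-segmentation both programs compute: split `l` before each element exceeding prev + g,
-- `curr` the open segment so far, `prev` its last element
def pvChunks (g : Int) : List Int → List Int → Int → List (List Int)
  | curr, [], _ => [curr]
  | curr, x :: xs, prev =>
      if prev + g < x then curr :: pvChunks g [x] xs x else pvChunks g (curr ++ [x]) xs x

-- keep the long segments, flattened
def pvKeep (m : Int) (segs : List (List Int)) : List Int :=
  segs.flatMap (fun s => if m ≤ (s.length : Int) then s else [])

theorem pvKeep_nil (m : Int) : pvKeep m [] = [] := rfl

theorem pvKeep_cons (m : Int) (s : List Int) (rest : List (List Int)) :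
    pvKeep m (s :: rest) = (if m ≤ (s.length : Int) then s else []) ++ pvKeep m rest := by
  simp [pvKeep]

theorem pvKeep_append (m : Int) (a b : List (List Int)) :
    pvKeep m (a ++ b) = pvKeep m a ++ pvKeep m b := by
  simp [pvKeep]

-- A's second loop is pvKeep
theorem keep_fold (m : Int) (segs : List (List Int)) (acc : List Int) :
    segs.foldl (fun filtered seg =>
      if m ≤ (seg.length : Int) then filtered ++ seg else filtered) acc
    = acc ++ pvKeep m segs := by
  have h : (fun (filtered : List Int) (seg : List Int) =>
      if m ≤ (seg.length : Int) then filtered ++ seg else filtered)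
      = fun filtered seg => filtered ++ (if m ≤ (seg.length : Int) then seg else []) := by
    funext filtered seg; split <;> simp
  rw [h, PySem.List.foldl_append_eq_flatMap]
  rfl

-- A's first loop computes pvChunks
theorem loopA (m g : Int) (l : List Int) : ∀ (segs : List (List Int)) (curr : List Int) (prev : Int),
    curr ≠ [] → PySem.List.pyGetD curr (-1) 0 = prev →
    pvKeep m ((l.foldl
      (fun (st : List (List Int) × List Int) resid =>
        if PySem.List.pyGetD st.2 (-1) 0 + g < resid then
          (st.1 ++ [st.2], [resid])
        else
          (st.1, st.2 ++ [resid])) (segs, curr)).1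
      ++ [(l.foldl
      (fun (st : List (List Int) × List Int) resid =>
        if PySem.List.pyGetD st.2 (-1) 0 + g < resid then
          (st.1 ++ [st.2], [resid])
        else
          (st.1, st.2 ++ [resid])) (segs, curr)).2])
    = pvKeep m segs ++ pvKeep m (pvChunks g curr l prev) := by
  induction l with
  | nil =>
      intro segs curr prev hne hlast
      simp [pvChunks, pvKeep_append]
  | cons x xs ih =>
      intro segs curr prev hne hlast
      simp only [List.foldl_cons, pvChunks, hlast]
      by_cases hbr : prev + g < x
      · simp only [if_pos hbr]
        rw [ih (segs ++ [curr]) [x] x (by simp) (by simp [PySem.List.pyGetD_neg_one])]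
        simp [pvKeep_append, pvKeep_cons, pvKeep_nil]
      · simp only [if_neg hbr]
        rw [ih segs (curr ++ [x]) x (by simp) (PySem.List.pyGetD_neg_one_append_singleton curr x 0)]

-- the labels B's loop emits while consuming `l`, with current previous element and run id
def pvLabs (g : Int) : List Int → Int → Int → List Int
  | [], _, _ => []
  | x :: xs, prev, run =>
      if prev + g < x then (run + 1) :: pvLabs g xs x (run + 1) else run :: pvLabs g xs x run

-- the labels of a chunk list: chunk j gets id k + j
def pvLabels : List (List Int) → Int → List Int
  | [], _ => []
  | c :: rest, k => List.replicate c.length k ++ pvLabels rest (k + 1)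

-- B's labelling loop computes pvLabs
theorem foldB (g : Int) (l : List Int) : ∀ (labels0 : List Int) (run prev : Int),
    (l.foldl (pvStepB g) (labels0, run, some prev)).1 = labels0 ++ pvLabs g l prev run := by
  induction l with
  | nil => intro labels0 run prev; simp [pvLabs]
  | cons x xs ih =>
      intro labels0 run prev
      simp only [List.foldl_cons, pvStepB, pvLabs]
      by_cases hbr : prev + g < x
      · simp [if_pos hbr, ih]
      · simp [if_neg hbr, ih]

-- pvLabs is the tail of the chunk labelling
theorem labs_chunks (g : Int) (l : List Int) : ∀ (curr : List Int) (prev run : Int),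
    List.replicate curr.length run ++ pvLabs g l prev run
    = pvLabels (pvChunks g curr l prev) run := by
  induction l with
  | nil => intro curr prev run; simp [pvLabs, pvChunks, pvLabels]
  | cons x xs ih =>
      intro curr prev run
      simp only [pvLabs, pvChunks]
      by_cases hbr : prev + g < x
      · simp only [if_pos hbr, pvLabels]
        rw [← ih [x] x (run + 1)]
        simp
      · simp only [if_neg hbr]
        rw [← ih (curr ++ [x]) x run]
        simp [List.replicate_succ']

theorem mem_pvLabels : ∀ (segs : List (List Int)) (k lab : Int), lab ∈ pvLabels segs k → k ≤ lab := by
  intro segs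
  induction segs with
  | nil => intro k lab h; simp [pvLabels] at h
  | cons c rest ih =>
      intro k lab h
      simp only [pvLabels, List.mem_append, List.mem_replicate] at h
      rcases h with ⟨_, rfl⟩ | h
      · exact le_refl _
      · have := ih (k + 1) lab h; omega

theorem flatten_pvChunks (g : Int) (l : List Int) : ∀ (curr : List Int) (prev : Int),
    (pvChunks g curr l prev).flatten = curr ++ l := by
  induction l with
  | nil => intro curr prev; simp [pvChunks]
  | cons x xs ih =>
      intro curr prev
      simp only [pvChunks]
      by_cases hbr : prev + g < x
      · simp [if_pos hbr, ih]
      · simp [if_neg hbr, ih]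

theorem zip_replicate_right (k : Int) : ∀ (c : List Int),
    c.zip (List.replicate c.length k) = c.map (fun x => (x, k)) := by
  intro c
  induction c with
  | nil => rfl
  | cons a t ih => simp [List.replicate_succ, ih]

-- the heart of B: filtering the zipped list by run-size lookup equals keeping the long chunks
theorem mainlem (m : Int) : ∀ (segs : List (List Int)) (k : Int) (cnt : Int → Int),
    (∀ lab, k ≤ lab → cnt lab = ((pvLabels segs k).count lab : Int)) →
    ((segs.flatten.zip (pvLabels segs k)).filter (fun p => decide (m ≤ cnt p.2))).map Prod.fst
      = pvKeep m segs := by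
  intro segs
  induction segs with
  | nil => intro k cnt _; simp [pvLabels, pvKeep]
  | cons c rest ih =>
      intro k cnt hcnt
      have htail0 : (pvLabels rest (k + 1)).count k = 0 := by
        rw [List.count_eq_zero]
        intro hmem
        have := mem_pvLabels rest (k + 1) k hmem; omega
      have hck : cnt k = (c.length : Int) := by
        rw [hcnt k (le_refl k)]
        simp [pvLabels, List.count_append, htail0]
      have hzip : (c ++ rest.flatten).zip (List.replicate c.length k ++ pvLabels rest (k + 1))
          = c.zip (List.replicate c.length k) ++ rest.flatten.zip (pvLabels rest (k + 1)) :=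
        List.zip_append (by simp)
      simp only [pvLabels, List.flatten_cons, hzip, List.filter_append, List.map_append]
      rw [zip_replicate_right, List.filter_map, List.map_map]
      have hhead : (c.filter ((fun p => decide (m ≤ cnt p.2)) ∘ fun x => (x, k))).map
          (Prod.fst ∘ fun x => (x, k)) = if m ≤ (c.length : Int) then c else [] := by
        by_cases hlong : m ≤ (c.length : Int)
        · have : ((fun p => decide (m ≤ cnt p.2)) ∘ fun (x : Int) => (x, k)) = fun _ => true := by
            funext x; simp [hck, hlong]
          rw [this, if_pos hlong]
          simp [Function.comp_def]
        · have : ((fun p => decide (m ≤ cnt p.2)) ∘ fun (x : Int) => (x, k)) = fun _ => false := by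
            funext x; simp [hck]; omega
          rw [this, if_neg hlong]
          simp
      have htail : ((rest.flatten.zip (pvLabels rest (k + 1))).filter
          (fun p => decide (m ≤ cnt p.2))).map Prod.fst = pvKeep m rest := by
        apply ih (k + 1) cnt
        intro lab hlab
        rw [hcnt lab (by omega)]
        have hlabne : (List.replicate c.length k).count lab = 0 := by
          rw [List.count_eq_zero]
          intro hmem
          rw [List.mem_replicate] at hmem
          omega
        simp [pvLabels, List.count_append, hlabne]
      rw [hhead, htail, pvKeep_cons]

-- ===== VERDICT (by name: the statement is the Claim_ definition above) =====
theorem filter_segments_by_length_spec : Claim_equal_filter_segments_by_length := by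
  intro residues m g _
  unfold Spec_filter_segments_by_length filter_segments_by_length filter_segments_by_length_alt
  by_cases h : residues = []
  · subst h
    rfl
  · rw [if_neg h]
    simp only []
    set r := PySem.List.sorted residues (fun x => x) false with hrdef
    have hr : r ≠ [] := by
      rw [hrdef, Ne, PySem.List.sorted_eq_nil_iff]
      exact h
    obtain ⟨x0, rest, hcons⟩ := List.exists_cons_of_ne_nil hr
    rw [hcons]
    -- A side
    rw [keep_fold, PySem.List.slice_from_one]
    simp only [List.tail_cons, PySem.List.pyGetD_zero_cons]
    rw [loopA m g rest [] [x0] x0 (by simp) (by simp [PySem.List.pyGetD_neg_one])]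
    -- B side
    have hlab : ((x0 :: rest).foldl (pvStepB g) ([], 0, none)).1
        = pvLabels (pvChunks g [x0] rest x0) 0 := by
      have hstep : pvStepB g ([], 0, none) x0 = ([0], 0, some x0) := rfl
      rw [List.foldl_cons, hstep, foldB]
      rw [← labs_chunks g rest [x0] x0 0]
      rfl
    rw [hlab]
    set segs := pvChunks g [x0] rest x0 with hsegs
    have hflat : segs.flatten = x0 :: rest := by
      rw [hsegs, flatten_pvChunks]; rfl
    have hcnt : ∀ lab, (0 : Int) ≤ lab →
        ((pvLabels segs 0).foldl (fun d l => d.insert l (d.getD l 0 + 1)) PySem.Dict.empty).getD lab 0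
        = ((pvLabels segs 0).count lab : Int) := by
      intro lab _
      rw [PySem.Dict.getD_foldl_insert_add_one]
      simp
    have hmain := mainlem m segs 0
      (fun lab => ((pvLabels segs 0).foldl (fun d l => d.insert l (d.getD l 0 + 1)) PySem.Dict.empty).getD lab 0)
      hcnt
    rw [hflat] at hmain
    rw [hmain]
    simp [pvKeep]
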